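-- pv_equiv track=rewrite | github.com/midnattssol/shortcake | shortcake/utils.py | is_rectangular
-- ===== SOURCE A (Python) =====
-- import itertools as it
--
-- def isiterable(item: object) -> bool:
--     """Get whether or not an object is iterable."""
--     return hasattr(item, "__iter__")
--
-- def is_rectangular(nested: iter, dims: int = 2) -> bool:
--     """Get whether or not a nested iterable is (hyper?)rectangular.
--
--     >>> is_rectangular([[1, 2, 3], [1, 2]])
--     False
--     >>> is_rectangular([[1, 2, 3], [1, 2, 3]])
--     True
--     """
--     assert isinstance(dims, int) and dims > 0, dims
--     if dims == 1:
--         return isiterable(nested)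
--
--     lengths = map(len, nested)
--     prev = None
--     for length in lengths:
--         if prev is not None and length != prev:
--             return False
--         prev = length
--
--     if dims > 2:
--         return all(map(is_rectangular, nested, it.repeat(dims - 1)))
--     return True
-- ===== SOURCE B (Python) =====
-- def isiterable(item: object) -> bool:
--     """Get whether or not an object is iterable."""
--     return hasattr(item, "__iter__")
--
-- def is_rectangular(nested, dims: int = 2) -> bool:
--     """Iterative re-implementation: explicit-stack pre-order DFS; each level's
--     length check is done via a set of the children's lengths."""
--     assert isinstance(dims, int) and dims > 0, dims
--     if dims == 1:
--         return isiterable(nested)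
--     stack = [(nested, dims)]
--     while stack:
--         node, d = stack.pop()
--         children = list(node)
--         if len({len(c) for c in children}) > 1:
--             return False
--         if d > 2:
--             stack.extend((c, d - 1) for c in reversed(children))
--     return True
-- ===== Notes on version B (the rewrite author's own statement) =====
-- stated objective: alternative
-- what changed: Replaces the recursive pre-order traversal and the prev-based length loop with an explicit-stack DFS whose per-level check builds a set of the children's lengths.
import Mathlib
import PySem

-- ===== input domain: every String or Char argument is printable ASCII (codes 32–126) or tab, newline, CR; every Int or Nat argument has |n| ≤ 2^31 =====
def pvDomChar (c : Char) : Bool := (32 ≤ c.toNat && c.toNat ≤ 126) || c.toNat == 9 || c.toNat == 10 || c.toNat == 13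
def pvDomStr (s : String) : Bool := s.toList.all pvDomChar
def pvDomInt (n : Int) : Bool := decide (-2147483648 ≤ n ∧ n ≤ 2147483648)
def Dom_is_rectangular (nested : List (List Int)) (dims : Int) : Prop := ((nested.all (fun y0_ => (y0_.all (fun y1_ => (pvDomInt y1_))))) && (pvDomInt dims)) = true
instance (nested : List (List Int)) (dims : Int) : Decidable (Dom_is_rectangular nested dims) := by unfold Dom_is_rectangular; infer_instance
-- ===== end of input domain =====

-- ===== PORT A =====
-- B changes the traversal only; the return value is proved equal; A mutates nothing.
-- A's length loop: prev starts as None, return False on first length differing from prev.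
def lenLoopA (xs : List (List Int)) (prev : Option Int) : Bool :=
  match xs with
  | [] => true
  | x :: t =>
      let length : Int := x.length
      match prev with
      | some p => if length ≠ p then false else lenLoopA t (some length)
      | none => lenLoopA t (some length)

-- A's recursive call on a child (a List Int) with dims' = dims - 1 ≥ 2:
-- Python maps len over the child's elements (ints), which raises TypeError on any
-- nonempty child — those inputs are outside Pre_; on an empty child every deeper
-- level is vacuous and the call returns True. Exact on Pre_.
def isRectChildA (child : List Int) (dims' : Int) : Bool :=
  if dims' == 1 then true        -- isiterable(child)
  else
    match child with
    | [] => true                 -- empty length loop passes; dims'>2 recursion over [] is all([]) = True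
    | _ :: _ => false            -- Python raises TypeError here (excluded by Pre_)

def is_rectangular (nested : List (List Int)) (dims : Int) : Bool :=
  if dims == 1 then true         -- isiterable(nested): a list is iterable
  else
    if lenLoopA nested none = false then false
    else if dims > 2 then nested.all (fun c => isRectChildA c (dims - 1))
    else true

-- ===== PORT B =====
-- B's stack holds (node, d) entries below the root; stack.extend(reversed(children))
-- followed by LIFO pops processes children left to right, so the stack is modelled
-- head-first in left-to-right order. Entries below the root are List Int nodes:
-- listing a nonempty one's "children" and taking len(int) raises TypeError
-- (excluded by Pre_); an empty one passes its (empty) set check and pushes nothing.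
def stackLoopB (stack : List (List Int × Int)) : Bool :=
  match stack with
  | [] => true
  | (node, _d) :: rest =>
      match node with
      | [] => stackLoopB rest
      | _ :: _ => false          -- Python raises TypeError here (excluded by Pre_)

def is_rectangular_alt (nested : List (List Int)) (dims : Int) : Bool :=
  if dims == 1 then true
  else
    -- first loop iteration, node = nested: set of the children's lengths
    let lens : PySem.Set Int := PySem.Set.ofList (nested.map (fun c => (c.length : Int)))
    if lens.length > 1 then false
    else if dims > 2 then stackLoopB (nested.map (fun c => (c, dims - 1)))
    else true

-- ===== PRECONDITION & SPEC =====
-- Pre_ excludes exactly the inputs where the Python A raises: dims ≤ 0 (assert), and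
-- dims > 2 with all row lengths equal and some row nonempty (TypeError: len of int
-- in the recursive call). B raises on the same inputs.
def Pre_is_rectangular (nested : List (List Int)) (dims : Int) : Prop :=
  0 < dims ∧ (2 < dims →
    (∀ l ∈ nested, l = []) ∨ ¬ (∀ a ∈ nested, ∀ b ∈ nested, a.length = b.length))
instance (nested : List (List Int)) (dims : Int) : Decidable (Pre_is_rectangular nested dims) := by unfold Pre_is_rectangular; infer_instance
def pvWitness_is_rectangular : List (List Int) × Int := ([[1, 2, 3], [4, 5, 6]], 2)
-- ===== PRECONDITION & SPEC (cont.) =====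
def Spec_is_rectangular (nested : List (List Int)) (dims : Int) (out : Bool) : Prop := out = is_rectangular_alt nested dims
instance (nested : List (List Int)) (dims : Int) (out : Bool) : Decidable (Spec_is_rectangular nested dims out) := by unfold Spec_is_rectangular; infer_instance

-- ===== CLAIM (what is proved, stated in full; the proofs are below) =====
def Claim_equal_is_rectangular : Prop := ∀ (nested : List (List Int)) (dims : Int), Dom_is_rectangular nested dims → Pre_is_rectangular nested dims → Spec_is_rectangular nested dims (is_rectangular nested dims)

-- ===== LEMMAS AND PROOFS =====

theorem lenLoopA_some (xs : List (List Int)) (p : Int) :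
    lenLoopA xs (some p) = true ↔ ∀ x ∈ xs, (x.length : Int) = p := by
  induction xs generalizing p with
  | nil => simp [lenLoopA]
  | cons x t ih =>
    simp only [lenLoopA]
    by_cases h : (x.length : Int) = p
    · subst h; simp [ih]
    · simp only [if_pos (by simpa using h), Bool.false_eq_true, false_iff]
      intro h'; exact absurd (h' x (List.mem_cons_self)) h

theorem lenLoopA_none (xs : List (List Int)) :
    lenLoopA xs none = true ↔ ∀ a ∈ xs, ∀ b ∈ xs, a.length = b.length := by
  cases xs with
  | nil => simp [lenLoopA]
  | cons x t =>
    show lenLoopA t (some (x.length : Int)) = true ↔ _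
    rw [lenLoopA_some]
    constructor
    · intro h a ha b hb
      have key : ∀ c ∈ x :: t, c.length = x.length := by
        intro c hc
        rcases List.mem_cons.mp hc with rfl | hc
        · rfl
        · exact_mod_cast h c hc
      rw [key a ha, key b hb]
    · intro h y hy
      exact congrArg (Int.ofNat) (h y (List.mem_cons_of_mem _ hy) x (List.mem_cons_self))

theorem nodup_all_eq_length_le_one {α : Type} {l : List α} (hn : l.Nodup)
    (h : ∀ x ∈ l, ∀ y ∈ l, x = y) : l.length ≤ 1 := by
  match l with
  | [] => simp
  | [a] => simp
  | a :: b :: t =>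
    exfalso
    have : a = b := h a (by simp) b (by simp)
    simp [this] at hn

theorem setLen_le_one (l : List Int) :
    (PySem.Set.ofList l).length ≤ 1 ↔ ∀ x ∈ l, ∀ y ∈ l, x = y := by
  constructor
  · intro h x hx y hy
    have hx' : x ∈ PySem.Set.ofList l := (PySem.Set.mem_ofList _ _).mpr hx
    have hy' : y ∈ PySem.Set.ofList l := (PySem.Set.mem_ofList _ _).mpr hy
    match hs : PySem.Set.ofList l with
    | [] => rw [hs] at hx'; simp at hx'
    | [a] => rw [hs] at hx' hy'; simp at hx' hy'; rw [hx', hy']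
    | a :: b :: t => rw [hs] at h; simp at h
  · intro h
    refine nodup_all_eq_length_le_one (PySem.Set.nodup_ofList l) ?_
    intro x hx y hy
    exact h x ((PySem.Set.mem_ofList _ _).mp hx) y ((PySem.Set.mem_ofList _ _).mp hy)

theorem setLens_iff (nested : List (List Int)) :
    (PySem.Set.ofList (nested.map (fun c => (c.length : Int)))).length ≤ 1 ↔
      ∀ a ∈ nested, ∀ b ∈ nested, a.length = b.length := by
  rw [setLen_le_one]
  constructor
  · intro h a ha b hb
    exact_mod_cast h _ (List.mem_map_of_mem ha) _ (List.mem_map_of_mem hb)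
  · intro h x hx y hy
    obtain ⟨a, ha, rfl⟩ := List.mem_map.mp hx
    obtain ⟨b, hb, rfl⟩ := List.mem_map.mp hy
    exact_mod_cast h a ha b hb

theorem stackLoopB_empties (stack : List (List Int × Int))
    (h : ∀ e ∈ stack, e.1 = []) : stackLoopB stack = true := by
  induction stack with
  | nil => rfl
  | cons e rest ih =>
    obtain ⟨node, d⟩ := e
    have : node = [] := h (node, d) (by simp)
    subst this
    exact ih (fun e he => h e (List.mem_cons_of_mem _ he))

-- ===== VERDICT (by name: the statement is the Claim_ definition above) =====
theorem is_rectangular_spec : Claim_equal_is_rectangular := by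
  intro nested dims _hdom hpre
  unfold Spec_is_rectangular is_rectangular is_rectangular_alt
  by_cases h1 : dims = 1
  · simp [h1]
  · have h1' : (dims == 1) = false := by simp [h1]
    rw [h1']
    simp only [Bool.false_eq_true, if_false]
    by_cases heq : ∀ a ∈ nested, ∀ b ∈ nested, a.length = b.length
    · have hlA : lenLoopA nested none = true := (lenLoopA_none nested).mpr heq
      have hlB : ¬ (PySem.Set.ofList (nested.map (fun c => (c.length : Int)))).length > 1 := by
        have := (setLens_iff nested).mpr heq; omega
      rw [hlA]
      simp only [if_neg hlB, Bool.true_eq_false, if_false]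
      by_cases h2 : dims > 2
      · have hemp : ∀ l ∈ nested, l = [] := by
          rcases hpre.2 h2 with h | h
          · exact h
          · exact absurd heq h
        rw [if_pos h2, if_pos h2]
        have hA : nested.all (fun c => isRectChildA c (dims - 1)) = true := by
          rw [List.all_eq_true]
          intro c hc
          rw [hemp c hc]
          simp [isRectChildA]
        rw [hA]
        exact (stackLoopB_empties _ (by
          intro e he
          obtain ⟨c, hc, rfl⟩ := List.mem_map.mp he
          exact hemp c hc)).symm
      · rw [if_neg h2, if_neg h2]
    · have hlA : lenLoopA nested none = false := by
        cases hv : lenLoopA nested none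
        · rfl
        · exact absurd ((lenLoopA_none nested).mp hv) heq
      have hlB : (PySem.Set.ofList (nested.map (fun c => (c.length : Int)))).length > 1 := by
        by_contra hc
        exact heq ((setLens_iff nested).mp (by omega))
      rw [hlA]
      simp [hlB]
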